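-- pv_equiv track=rewrite | github.com/dativebase/dailp-ingest | ingest/ingest.py | get_comments_ppp
-- ===== SOURCE A (Python) =====
-- def get_comments_ppp(pronominal_prefix):
--     """Get a string of comments for a prepronominal prefix from."""
--     comments_attrs = (
--         ('h3_specification', 'H3 specification'),
--         ('tonicity', 'tonicity'),
--         ('taoc', 'TAOC'),
--         ('taoc_tag', 'TAOC tag'),
--     )
--     to_many_attrs = {
--         'crg': 'CRG',
--         'bma_2008': 'BMA 2008',
--     }
--     ret = []
--     first_to_manys = {}
--     final_to_manys = []
--     for attr, name in comments_attrs: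
--         val = pronominal_prefix.get(attr, '').strip()
--         if val:
--             ret.append('{}: {}.'.format(name, val))
--     for key, val in pronominal_prefix.items():
--         val = val.strip()
--         if not val:
--             continue
--         try:
--             entity, index, attr = key.split('.')
--         except ValueError as err:
--             continue
--         true_index = int(index)
--         human_index = str(true_index + 1)
--         attr = attr.replace('_', ' ')
--         if attr == 'pp':
--             attr = 'pp.'
--         entities = first_to_manys.setdefault(entity, {})
--         entity_list = entities.setdefault(human_index, [])
--         entity_list.append('{} {}'.format(attr, val))
--     for key, manys in first_to_manys.items():
--         key = to_many_attrs[key]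
--         for index, sentence_parts in manys.items():
--             subkey = '{} reference {}'.format(key, index)
--             subval = ', '.join(sentence_parts)
--             final_to_manys.append('{}: {}.'.format(subkey, subval))
--     return ' '.join(ret + sorted(final_to_manys))
-- ===== SOURCE B (Python) =====
-- def get_comments_ppp(pronominal_prefix):
--     """Get a string of comments for a prepronominal prefix from."""
--     comments_attrs = (
--         ('h3_specification', 'H3 specification'),
--         ('tonicity', 'tonicity'),
--         ('taoc', 'TAOC'),
--         ('taoc_tag', 'TAOC tag'),
--     )
--     to_many_attrs = {
--         'crg': 'CRG',
--         'bma_2008': 'BMA 2008',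
--     }
--     ret = [
--         '{}: {}.'.format(name, val)
--         for attr, name in comments_attrs
--         for val in [pronominal_prefix.get(attr, '').strip()]
--         if val
--     ]
--     # No grouping dict at all: record (group-key, part) events in one pass, then
--     # for each distinct group key rescan the flat event list to collect its parts.
--     events = []
--     for key, val in pronominal_prefix.items():
--         val = val.strip()
--         parts = key.split('.')
--         if not val or len(parts) != 3:
--             continue
--         entity, index, attr = parts
--         human_index = str(int(index) + 1)
--         attr = attr.replace('_', ' ')
--         if attr == 'pp':
--             attr = 'pp.'
--         events.append(((entity, human_index), '{} {}'.format(attr, val)))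
--     seen = []
--     for group, _ in events:
--         if group not in seen:
--             seen.append(group)
--     tail = sorted(
--         '{} reference {}: {}.'.format(
--             to_many_attrs[entity], human_index,
--             ', '.join(part for group, part in events
--                       if group == (entity, human_index)))
--         for entity, human_index in seen)
--     return ' '.join(ret + tail)
-- ===== Notes on version B (the rewrite author's own statement) =====
-- stated objective: alternative
-- what changed: Eliminates the nested dict-of-dicts grouping structure entirely: B records a flat list of ((entity, human_index), part) events in one pass, collects the distinct group keys, and builds each group's comment by re-filtering the event list per key (correct because filtering preserves the per-group insertion order and the final sorted() makes group order irrelevant); the attribute-comment loop becomes a comprehension.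
import Mathlib
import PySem

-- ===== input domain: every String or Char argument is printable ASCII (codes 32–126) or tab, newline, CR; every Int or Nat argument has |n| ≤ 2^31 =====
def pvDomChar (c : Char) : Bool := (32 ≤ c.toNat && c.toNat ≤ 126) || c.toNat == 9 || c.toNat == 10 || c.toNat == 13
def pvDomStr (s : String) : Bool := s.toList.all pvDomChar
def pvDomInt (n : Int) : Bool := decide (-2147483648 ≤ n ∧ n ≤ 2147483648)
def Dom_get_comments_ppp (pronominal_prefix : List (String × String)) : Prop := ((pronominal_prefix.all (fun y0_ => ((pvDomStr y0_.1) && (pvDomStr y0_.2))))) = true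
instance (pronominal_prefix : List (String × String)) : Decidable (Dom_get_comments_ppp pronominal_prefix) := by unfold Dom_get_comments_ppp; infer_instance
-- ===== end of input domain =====

-- B eliminates A's nested dict-of-dicts grouping: it records a flat list of
-- ((entity, human_index), part) events, scans it for the distinct group keys, and
-- builds each group's comment by re-filtering the event list per key (alternative
-- decomposition; no speed claim).

-- string concatenation of the ''.format pieces (both Pythons build strings with .format)
def pvCat (xs : List String) : String := PySem.Str.join "" xs

def pvCommentsAttrs : List (String × String) :=
  [("h3_specification", "H3 specification"), ("tonicity", "tonicity"),
   ("taoc", "TAOC"), ("taoc_tag", "TAOC tag")]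

def pvToMany : PySem.Dict String String :=
  PySem.Dict.ofList [("crg", "CRG"), ("bma_2008", "BMA 2008")]

-- ===== PORT A =====
def get_comments_ppp (pronominal_prefix : List (String × String)) : String :=
  let d := PySem.Dict.ofList pronominal_prefix
  let ret : List String := pvCommentsAttrs.foldl (fun acc an =>
    let val := PySem.Str.strip (d.getD an.1 "")
    if val = "" then acc else acc ++ [pvCat [an.2, ": ", val, "."]]) []
  let first_to_manys : PySem.Dict String (PySem.Dict String (List String)) :=
    d.items.foldl (fun f kv =>
      let val := PySem.Str.strip kv.2
      if val = "" then f
      else match PySem.Str.split? kv.1 "." with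
        | some [entity, index, attr0] =>
          match PySem.Int.ofStr? index with
          | some true_index =>
            let human_index := PySem.Int.toStr (true_index + 1)
            let attr1 := PySem.Str.replace attr0 "_" " "
            let attr := if attr1 = "pp" then "pp." else attr1
            f.modify entity PySem.Dict.empty
              (fun entities => entities.modify human_index [] (fun l => l ++ [pvCat [attr, " ", val]]))
          | none => f    -- Python raises ValueError (int(index)); excluded by Pre_
        | _ => f)        -- ValueError from the 3-tuple unpack is caught: continue
      PySem.Dict.empty
  let final_to_manys : List String :=
    first_to_manys.items.foldl (fun acc ekv =>
      let key := pvToMany.getD ekv.1 ""   -- Python raises KeyError when absent; excluded by Pre_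
      ekv.2.items.foldl (fun acc2 il =>
        acc2 ++ [pvCat [key, " reference ", il.1, ": ", PySem.Str.join ", " il.2, "."]]) acc) []
  PySem.Str.join " " (ret ++ PySem.List.sorted final_to_manys (fun x => x))

-- ===== PORT B =====
def get_comments_ppp_alt (pronominal_prefix : List (String × String)) : String :=
  let d := PySem.Dict.ofList pronominal_prefix
  let ret : List String := pvCommentsAttrs.filterMap (fun an =>
    let val := PySem.Str.strip (d.getD an.1 "")
    if val = "" then none else some (pvCat [an.2, ": ", val, "."]))
  -- one flat event list, no grouping dict
  let events : List ((String × String) × String) := d.items.foldl (fun ev kv =>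
    let val := PySem.Str.strip kv.2
    let parts := (PySem.Str.split? kv.1 ".").getD []   -- split('.') with a non-empty sep always succeeds
    if val = "" then ev                                 -- 'not val or len(parts) != 3' short-circuits
    else if parts.length != 3 then ev
    else
      let entity := parts.getD 0 ""
      let index := parts.getD 1 ""
      let attr0 := parts.getD 2 ""
      -- int(index) raises ValueError on a non-parse; those inputs are excluded by Pre_
      (PySem.Int.ofStr? index).elim ev (fun ti =>
        let human_index := PySem.Int.toStr (ti + 1)
        let attr1 := PySem.Str.replace attr0 "_" " "
        let attr := if attr1 = "pp" then "pp." else attr1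
        ev ++ [((entity, human_index), pvCat [attr, " ", val])])) []
  -- distinct group keys in first-occurrence order
  let seen : List (String × String) := events.foldl (fun s e =>
    if e.1 ∈ s then s else s ++ [e.1]) []
  -- per distinct key: rescan the event list for its parts
  let tail : List String := PySem.List.sorted (seen.map (fun k =>
    pvCat [pvToMany.getD k.1 "", " reference ", k.2, ": ",
           PySem.Str.join ", " ((events.filter (fun q => q.1 == k)).map Prod.snd), "."]))
    (fun x => x)
  PySem.Str.join " " (ret ++ tail)

-- ===== PRECONDITION & SPEC =====
-- Pre_ excludes exactly the inputs on which Python A raises: an entry whose stripped value is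
-- non-empty and whose key splits into exactly 3 dot-parts must have an int()-parsable middle
-- part (else uncaught ValueError) and a first part in {'crg','bma_2008'} (else KeyError).
def Pre_get_comments_ppp (pronominal_prefix : List (String × String)) : Prop :=
  ((PySem.Dict.ofList pronominal_prefix).items.all (fun kv =>
    let parts := (PySem.Str.split? kv.1 ".").getD []
    (parts.length != 3) || (PySem.Str.strip kv.2 == "") ||
      ((PySem.Int.ofStr? (parts.getD 1 "")).isSome &&
        (parts.getD 0 "" == "crg" || parts.getD 0 "" == "bma_2008")))) = true
instance (pronominal_prefix : List (String × String)) : Decidable (Pre_get_comments_ppp pronominal_prefix) := by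
  unfold Pre_get_comments_ppp; infer_instance

def pvWitness_get_comments_ppp : (List (String × String)) :=
  [("h3_specification", " spec "), ("crg.0.pp", "x"), ("bma_2008.1.some_attr", "y"), ("foo", "z")]

def Spec_get_comments_ppp (pronominal_prefix : List (String × String)) (out : String) : Prop := out = get_comments_ppp_alt pronominal_prefix
instance (pronominal_prefix : List (String × String)) (out : String) : Decidable (Spec_get_comments_ppp pronominal_prefix out) := by unfold Spec_get_comments_ppp; infer_instance

-- ===== CLAIM (what is proved, stated in full; the proofs are below) =====
def Claim_equal_get_comments_ppp : Prop := ∀ (pronominal_prefix : List (String × String)), Dom_get_comments_ppp pronominal_prefix → Pre_get_comments_ppp pronominal_prefix → Spec_get_comments_ppp pronominal_prefix (get_comments_ppp pronominal_prefix)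

-- ===== LEMMAS AND PROOFS =====

-- `pvGbump k f v0 l`: the items-list effect of Python's `setdefault`-then-append / dict `modify`:
-- replace the (unique) entry with key k by (k, f value), or append (k, v0) if k is absent.
def pvGbump {κ ν : Type} [BEq κ] (k : κ) (f : ν → ν) (v0 : ν) : List (κ × ν) → List (κ × ν)
  | [] => [(k, v0)]
  | q :: r => if q.1 == k then (k, f q.2) :: r else q :: pvGbump k f v0 r

theorem pvGbump_of_not_mem {κ ν : Type} [BEq κ] [LawfulBEq κ] (k : κ) (f : ν → ν) (v0 : ν)
    (l : List (κ × ν)) (h : k ∉ l.map Prod.fst) :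
    pvGbump k f v0 l = l ++ [(k, v0)] := by
  induction l with
  | nil => rfl
  | cons q r ih =>
    simp only [List.map_cons, List.mem_cons, not_or] at h
    have hne : q.1 ≠ k := fun he => h.1 he.symm
    simp [pvGbump, hne, ih h.2]

theorem pvGbump_eq_map {κ ν : Type} [BEq κ] [LawfulBEq κ] (k : κ) (f : ν → ν) (v0 : ν)
    (l : List (κ × ν)) (hnd : (l.map Prod.fst).Nodup) (hm : k ∈ l.map Prod.fst) :
    pvGbump k f v0 l = l.map (fun q => if q.1 == k then (k, f q.2) else q) := by
  induction l with
  | nil => simp at hm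
  | cons q r ih =>
    simp only [List.map_cons, List.nodup_cons] at hnd
    by_cases hk : q.1 = k
    · subst hk
      have hr : ∀ x ∈ r, (if x.1 == q.1 then (q.1, f x.2) else x) = x := by
        intro x hx
        have : x.1 ≠ q.1 := fun he => hnd.1 (he ▸ List.mem_map_of_mem hx)
        simp [this]
      simp [pvGbump, List.map_congr_left hr]
    · have hm' : k ∈ r.map Prod.fst := by
        rcases List.mem_cons.mp hm with h | h
        · exact absurd h.symm hk
        · exact h
      simp [pvGbump, (beq_iff_eq ..).ne.mpr hk, ih hnd.2 hm']

theorem pvGbump_keys {κ ν : Type} [BEq κ] [LawfulBEq κ] (k : κ) (f : ν → ν) (v0 : ν)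
    (l : List (κ × ν)) :
    (pvGbump k f v0 l).map Prod.fst
      = if k ∈ l.map Prod.fst then l.map Prod.fst else l.map Prod.fst ++ [k] := by
  induction l with
  | nil => simp [pvGbump]
  | cons q r ih =>
    by_cases hk : q.1 = k
    · subst hk; simp [pvGbump]
    · have hne : q.1 ≠ k := hk
      by_cases hm : k ∈ r.map Prod.fst <;>
        simp [pvGbump, hne, ih, hm, List.mem_cons, Ne.symm hk]

theorem pvGbump_append_of_mem {κ ν : Type} [BEq κ] [LawfulBEq κ] (k : κ) (f : ν → ν) (v0 : ν)
    (l1 l2 : List (κ × ν)) (h : k ∈ l1.map Prod.fst) :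
    pvGbump k f v0 (l1 ++ l2) = pvGbump k f v0 l1 ++ l2 := by
  induction l1 with
  | nil => simp at h
  | cons q r ih =>
    by_cases hk : q.1 = k
    · subst hk; simp [pvGbump]
    · have h' : k ∈ r.map Prod.fst := by
        rcases List.mem_cons.mp h with h | h
        · exact absurd h.symm hk
        · exact h
      simp [pvGbump, (beq_iff_eq ..).ne.mpr hk, ih h']

theorem pvGbump_append_of_not_mem {κ ν : Type} [BEq κ] [LawfulBEq κ] (k : κ) (f : ν → ν) (v0 : ν)
    (l1 l2 : List (κ × ν)) (h : k ∉ l1.map Prod.fst) :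
    pvGbump k f v0 (l1 ++ l2) = l1 ++ pvGbump k f v0 l2 := by
  induction l1 with
  | nil => rfl
  | cons q r ih =>
    simp only [List.map_cons, List.mem_cons, not_or] at h
    have hne : q.1 ≠ k := fun he => h.1 he.symm
    simp [pvGbump, hne, ih h.2]

theorem pvGbump_perm {κ ν : Type} [BEq κ] [LawfulBEq κ] (k : κ) (f : ν → ν) (v0 : ν)
    {l1 l2 : List (κ × ν)} (h12 : l1.Perm l2) (hnd : (l1.map Prod.fst).Nodup) :
    (pvGbump k f v0 l1).Perm (pvGbump k f v0 l2) := by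
  have hk : (l1.map Prod.fst).Perm (l2.map Prod.fst) := h12.map Prod.fst
  by_cases hm : k ∈ l1.map Prod.fst
  · rw [pvGbump_eq_map k f v0 l1 hnd hm,
      pvGbump_eq_map k f v0 l2 (hk.nodup_iff.mp hnd) (hk.mem_iff.mp hm)]
    exact h12.map _
  · rw [pvGbump_of_not_mem k f v0 l1 hm,
      pvGbump_of_not_mem k f v0 l2 (fun h => hm (hk.mem_iff.mpr h))]
    exact h12.append_right _

theorem pvGbump_forall {κ ν : Type} [BEq κ] [LawfulBEq κ] (k : κ) (f : ν → ν) (v0 : ν)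
    (l : List (κ × ν)) (P : κ × ν → Prop)
    (hl : ∀ q ∈ l, P q) (h0 : P (k, v0)) (hf : ∀ w, P (k, w) → P (k, f w)) :
    ∀ q ∈ pvGbump k f v0 l, P q := by
  induction l with
  | nil => simpa [pvGbump] using h0
  | cons q r ih =>
    intro x hx
    by_cases hk : q.1 = k
    · subst hk
      simp only [pvGbump, BEq.rfl, if_true, List.mem_cons] at hx
      rcases hx with h | h
      · subst h
        exact hf q.2 (by simpa using hl q (List.mem_cons_self ..))
      · exact hl x (List.mem_cons_of_mem _ h)
    · have hne : q.1 ≠ k := hk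
      simp only [pvGbump, hne, beq_iff_eq, if_false, List.mem_cons] at hx
      rcases hx with h | h
      · exact h ▸ hl q (List.mem_cons_self ..)
      · exact ih (fun y hy => hl y (List.mem_cons_of_mem _ hy)) x h

-- dict.modify on the items list IS pvGbump (for a dict with Nodup keys)
theorem pvModify_items {κ ν : Type} [BEq κ] [LawfulBEq κ] (d : PySem.Dict κ ν)
    (k : κ) (dflt : ν) (f : ν → ν) (hnd : (d.items.map Prod.fst).Nodup) :
    (d.modify k dflt f).items = pvGbump k f (f dflt) d.items := by
  have hkeys : d.keys = d.items.map Prod.fst := by simp [PySem.Dict.keys]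
  by_cases hc : d.contains k = true
  · have hm : k ∈ d.items.map Prod.fst := by
      have := (PySem.Dict.contains_iff_mem_keys d k).mp hc
      rwa [hkeys] at this
    obtain ⟨q, hq, hq1⟩ := List.mem_map.mp hm
    have hqe : q = (k, q.2) := by rw [← hq1]
    have hg : d.getD k dflt = q.2 := by
      refine PySem.Dict.getD_of_mem_items d ?_ (hkeys ▸ hnd) dflt
      rw [← hqe]; exact hq
    show (d.insert k (f (d.getD k dflt))).items = _
    rw [PySem.Dict.items_insert_of_contains d _ hc, hg,
      pvGbump_eq_map k f (f dflt) d.items hnd hm]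
    refine List.map_congr_left (fun x hx => ?_)
    by_cases hxk : x.1 = k
    · have : x = (k, q.2) := by
        have := List.inj_on_of_nodup_map hnd hx (hqe ▸ hq) (by rw [hxk, ← hqe, hq1])
        rw [this, ← hqe]
      simp [this]
    · simp [hxk]
  · have hm : k ∉ d.items.map Prod.fst := by
      intro h
      exact hc ((PySem.Dict.contains_iff_mem_keys d k).mpr (hkeys ▸ h))
    have hg : d.getD k dflt = dflt := by
      apply PySem.Dict.getD_of_not_contains
      simpa using hc
    show (d.insert k (f (d.getD k dflt))).items = _
    rw [PySem.Dict.items_insert_of_not_contains d _ (by simpa using hc), hg,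
      pvGbump_of_not_mem k f (f dflt) d.items hm]

-- flatten A's nested dict state into ((entity, human_index), parts) pairs
def pvFlat (L : List (String × PySem.Dict String (List String))) :
    List ((String × String) × List String) :=
  L.flatMap (fun ei => ei.2.items.map (fun hl => ((ei.1, hl.1), hl.2)))

theorem pvFlat_fst_mem (L : List (String × PySem.Dict String (List String)))
    {q : String × String} (h : q ∈ (pvFlat L).map Prod.fst) : q.1 ∈ L.map Prod.fst := by
  simp only [pvFlat, List.map_flatMap, List.mem_flatMap] at h
  obtain ⟨ei, hei, hq⟩ := h
  simp only [List.map_map, List.mem_map] at hq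
  obtain ⟨hl, _, hq⟩ := hq
  subst hq
  exact List.mem_map_of_mem hei

theorem pvFlat_keys_nodup (L : List (String × PySem.Dict String (List String)))
    (hout : (L.map Prod.fst).Nodup) (hin : ∀ q ∈ L, (q.2.items.map Prod.fst).Nodup) :
    ((pvFlat L).map Prod.fst).Nodup := by
  induction L with
  | nil => simp [pvFlat]
  | cons q r ih =>
    simp only [List.map_cons, List.nodup_cons] at hout
    have hq := hin q (List.mem_cons_self ..)
    have ihr := ih hout.2 (fun y hy => hin y (List.mem_cons_of_mem _ hy))
    simp only [pvFlat, List.flatMap_cons, List.map_append]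
    refine List.Nodup.append ?_ ihr ?_
    · have hkm : (q.2.items.map (fun hl => ((q.1, hl.1), hl.2))).map Prod.fst
          = (q.2.items.map Prod.fst).map (fun z => (q.1, z)) := by
        simp [List.map_map]
      rw [hkm]
      exact hq.map (fun a b hab => by simpa using hab)
    · intro x hx hx'
      have h1 : x.1 = q.1 := by
        simp only [List.map_map, List.mem_map] at hx
        obtain ⟨hl, _, hh⟩ := hx
        rw [← hh]; rfl
      have := pvFlat_fst_mem r hx'
      rw [h1] at this
      exact hout.1 this

theorem pvGbump_map_pair (e h p : String) (M : List (String × List String)) :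
    (pvGbump h (fun l => l ++ [p]) [p] M).map (fun hl => ((e, hl.1), hl.2))
      = pvGbump (e, h) (fun l => l ++ [p]) [p] (M.map (fun hl => ((e, hl.1), hl.2))) := by
  induction M with
  | nil => rfl
  | cons q r ih =>
    by_cases hq : q.1 = h
    · simp [pvGbump, hq]
    · simp [pvGbump, hq, ih]

-- the key step: flattening after a nested bump ≈ a flat bump on the flattened list
theorem pvFlat_step (e h : String) (p : String)
    (L : List (String × PySem.Dict String (List String)))
    (hout : (L.map Prod.fst).Nodup) (hin : ∀ q ∈ L, (q.2.items.map Prod.fst).Nodup) :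
    (pvFlat (pvGbump e (fun inner => inner.modify h [] (fun l => l ++ [p]))
        ((PySem.Dict.empty).modify h [] (fun l => l ++ [p])) L)).Perm
      (pvGbump (e, h) (fun l => l ++ [p]) [p] (pvFlat L)) := by
  induction L with
  | nil =>
    simp [pvFlat, pvGbump, PySem.Dict.modify, PySem.Dict.insert, PySem.Dict.getD,
      PySem.Dict.get?, PySem.Dict.contains, PySem.Dict.empty]
  | cons q r ih =>
    simp only [List.map_cons, List.nodup_cons] at hout
    have hq := hin q (List.mem_cons_self ..)
    have ihr := ih hout.2 (fun y hy => hin y (List.mem_cons_of_mem _ hy))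
    by_cases he : q.1 = e
    · have hgb : pvGbump e (fun inner => inner.modify h [] (fun l => l ++ [p]))
          ((PySem.Dict.empty).modify h [] (fun l => l ++ [p])) (q :: r)
          = (e, q.2.modify h [] (fun l => l ++ [p])) :: r := by
        simp [pvGbump, he]
      rw [hgb]
      have hitems : (q.2.modify h [] (fun l => l ++ [p])).items
          = pvGbump h (fun l => l ++ [p]) [p] q.2.items := by
        simpa using pvModify_items q.2 h [] (fun l => l ++ [p]) hq
      have hflat : pvFlat ((e, q.2.modify h [] (fun l => l ++ [p])) :: r)
          = pvGbump (e, h) (fun l => l ++ [p]) [p]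
              (q.2.items.map (fun hl => ((e, hl.1), hl.2))) ++ pvFlat r := by
        simp only [pvFlat, List.flatMap_cons, hitems]
        rw [pvGbump_map_pair]
      rw [hflat]
      have hblockkeys : ((q.2.items.map (fun hl => ((e, hl.1), hl.2))).map Prod.fst)
          = (q.2.items.map Prod.fst).map (fun z => (e, z)) := by
        simp [List.map_map]
      have hflatcons : pvFlat (q :: r)
          = q.2.items.map (fun hl => ((e, hl.1), hl.2)) ++ pvFlat r := by
        simp only [pvFlat, List.flatMap_cons, he]
      rw [hflatcons]
      by_cases hh : h ∈ q.2.items.map Prod.fst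
      · have hmem : (e, h) ∈ (q.2.items.map (fun hl => ((e, hl.1), hl.2))).map Prod.fst := by
          rw [hblockkeys]; exact List.mem_map.mpr ⟨h, hh, rfl⟩
        rw [pvGbump_append_of_mem _ _ _ _ _ hmem]
      · have hnmem : (e, h) ∉ (q.2.items.map (fun hl => ((e, hl.1), hl.2))).map Prod.fst := by
          rw [hblockkeys]
          intro hc
          obtain ⟨z, hz, hz2⟩ := List.mem_map.mp hc
          exact hh (by cases hz2; exact hz)
        have hnmem2 : (e, h) ∉ (pvFlat r).map Prod.fst := by
          intro hc
          exact hout.1 (he ▸ pvFlat_fst_mem r hc)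
        rw [pvGbump_of_not_mem _ _ _ _ hnmem,
          pvGbump_of_not_mem _ _ _ _ (by
            intro hc
            rcases List.mem_map.mp hc with ⟨y, hy, hyx⟩
            rcases List.mem_append.mp hy with hy | hy
            · exact hnmem (hyx ▸ List.mem_map_of_mem hy)
            · exact hnmem2 (hyx ▸ List.mem_map_of_mem hy))]
        rw [List.append_assoc, List.append_assoc]
        exact List.Perm.append_left _ List.perm_append_comm
    · have hgb : pvGbump e (fun inner => inner.modify h [] (fun l => l ++ [p]))
          ((PySem.Dict.empty).modify h [] (fun l => l ++ [p])) (q :: r)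
          = q :: pvGbump e (fun inner => inner.modify h [] (fun l => l ++ [p]))
              ((PySem.Dict.empty).modify h [] (fun l => l ++ [p])) r := by
        have hne : q.1 ≠ e := he
        simp [pvGbump, hne]
      rw [hgb]
      have hnm : (e, h) ∉ (q.2.items.map (fun hl => ((q.1, hl.1), hl.2))).map Prod.fst := by
        intro hc
        simp only [List.map_map, List.mem_map] at hc
        obtain ⟨hl, _, hh2⟩ := hc
        exact he (congrArg Prod.fst hh2)
      have h1 : pvFlat (q :: pvGbump e (fun inner => inner.modify h [] (fun l => l ++ [p]))
              ((PySem.Dict.empty).modify h [] (fun l => l ++ [p])) r)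
          = q.2.items.map (fun hl => ((q.1, hl.1), hl.2))
              ++ pvFlat (pvGbump e (fun inner => inner.modify h [] (fun l => l ++ [p]))
                  ((PySem.Dict.empty).modify h [] (fun l => l ++ [p])) r) := by
        simp [pvFlat]
      have h2 : pvGbump (e, h) (fun l => l ++ [p]) [p] (pvFlat (q :: r))
          = q.2.items.map (fun hl => ((q.1, hl.1), hl.2))
              ++ pvGbump (e, h) (fun l => l ++ [p]) [p] (pvFlat r) := by
        have h3 : pvFlat (q :: r) = q.2.items.map (fun hl => ((q.1, hl.1), hl.2)) ++ pvFlat r := by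
          simp [pvFlat]
        rw [h3, pvGbump_append_of_not_mem _ _ _ _ _ hnm]
      rw [h1, h2]
      exact List.Perm.append_left _ ihr

-- the optional event one input entry contributes (shared characterisation of both loops)
def pvEventOf? (kv : String × String) : Option ((String × String) × String) :=
  let val := PySem.Str.strip kv.2
  if val = "" then none
  else match PySem.Str.split? kv.1 "." with
    | some [entity, index, attr0] =>
      (PySem.Int.ofStr? index).map (fun ti =>
        let human_index := PySem.Int.toStr (ti + 1)
        let attr1 := PySem.Str.replace attr0 "_" " "
        let attr := if attr1 = "pp" then "pp." else attr1
        ((entity, human_index), pvCat [attr, " ", val]))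
    | _ => none

theorem pvEvents_eq (l : List (String × String)) (acc : List ((String × String) × String)) :
    l.foldl (fun ev kv =>
      let val := PySem.Str.strip kv.2
      let parts := (PySem.Str.split? kv.1 ".").getD []
      if val = "" then ev
      else if parts.length != 3 then ev
      else
        let entity := parts.getD 0 ""
        let index := parts.getD 1 ""
        let attr0 := parts.getD 2 ""
        (PySem.Int.ofStr? index).elim ev (fun ti =>
          let human_index := PySem.Int.toStr (ti + 1)
          let attr1 := PySem.Str.replace attr0 "_" " "
          let attr := if attr1 = "pp" then "pp." else attr1
          ev ++ [((entity, human_index), pvCat [attr, " ", val])])) acc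
    = acc ++ l.filterMap pvEventOf? := by
  induction l generalizing acc with
  | nil => simp
  | cons kv r ih =>
    rw [List.foldl_cons, List.filterMap_cons]
    by_cases hv : PySem.Str.strip kv.2 = ""
    · have he : pvEventOf? kv = none := by simp [pvEventOf?, hv]
      rw [he]
      simp only [hv, if_true]
      exact ih acc
    · simp only [if_neg hv]
      cases hs : PySem.Str.split? kv.1 "." with
      | none =>
        have he : pvEventOf? kv = none := by simp [pvEventOf?, hv, hs]
        rw [he]
        simpa using ih acc
      | some parts =>
        rcases parts with _ | ⟨e, _ | ⟨i, _ | ⟨a, _ | ⟨x, parts'⟩⟩⟩⟩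
        · have he : pvEventOf? kv = none := by simp [pvEventOf?, hv, hs]
          rw [he]; simpa using ih acc
        · have he : pvEventOf? kv = none := by simp [pvEventOf?, hv, hs]
          rw [he]; simpa using ih acc
        · have he : pvEventOf? kv = none := by simp [pvEventOf?, hv, hs]
          rw [he]; simpa using ih acc
        · simp only [Option.getD_some, List.getD_cons_zero, List.getD_cons_succ,
            List.length_cons, List.length_nil, Nat.zero_add, Nat.reduceAdd,
            bne_self_eq_false, Bool.false_eq_true, if_false]
          cases hoi : PySem.Int.ofStr? i with
          | none =>
            have he : pvEventOf? kv = none := by simp [pvEventOf?, hv, hs, hoi]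
            rw [he]
            exact ih acc
          | some ti =>
            have he : pvEventOf? kv = some ((e, PySem.Int.toStr (ti + 1)),
                pvCat [(if PySem.Str.replace a "_" " " = "pp" then "pp."
                        else PySem.Str.replace a "_" " "), " ", PySem.Str.strip kv.2]) := by
              simp [pvEventOf?, hv, hs, hoi]
            rw [he]
            dsimp only []
            rw [ih]
            simp
        · have he : pvEventOf? kv = none := by simp [pvEventOf?, hv, hs]
          rw [he]; simpa using ih acc

-- one flat-grouping step on an association list
def pvGStep (acc : List ((String × String) × List String)) (e : (String × String) × String) :
    List ((String × String) × List String) :=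
  pvGbump e.1 (fun l => l ++ [e.2]) [e.2] acc

-- main invariant: flattening A's nested state tracks the flat grouping of the event list
theorem pvMain_inv (l : List (String × String))
    (f : PySem.Dict String (PySem.Dict String (List String)))
    (gl : List ((String × String) × List String))
    (hp : (pvFlat f.items).Perm gl)
    (h1 : (f.items.map Prod.fst).Nodup)
    (h2 : ∀ q ∈ f.items, (q.2.items.map Prod.fst).Nodup) :
    (pvFlat ((l.foldl (fun f kv =>
      let val := PySem.Str.strip kv.2
      if val = "" then f
      else match PySem.Str.split? kv.1 "." with
        | some [entity, index, attr0] =>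
          match PySem.Int.ofStr? index with
          | some true_index =>
            let human_index := PySem.Int.toStr (true_index + 1)
            let attr1 := PySem.Str.replace attr0 "_" " "
            let attr := if attr1 = "pp" then "pp." else attr1
            f.modify entity PySem.Dict.empty
              (fun entities => entities.modify human_index [] (fun l => l ++ [pvCat [attr, " ", val]]))
          | none => f
        | _ => f) f).items)).Perm
      ((l.filterMap pvEventOf?).foldl pvGStep gl) := by
  induction l generalizing f gl with
  | nil => simpa using hp
  | cons kv rest ih =>
    rw [List.foldl_cons, List.filterMap_cons]
    by_cases hv : PySem.Str.strip kv.2 = ""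
    · have he : pvEventOf? kv = none := by simp [pvEventOf?, hv]
      rw [he]
      simp only [hv, if_true]
      exact ih f gl hp h1 h2
    · simp only [if_neg hv]
      cases hs : PySem.Str.split? kv.1 "." with
      | none =>
        have he : pvEventOf? kv = none := by simp [pvEventOf?, hv, hs]
        rw [he]
        exact ih f gl hp h1 h2
      | some parts =>
        rcases parts with _ | ⟨e, _ | ⟨i, _ | ⟨a, _ | ⟨x, parts'⟩⟩⟩⟩
        · have he : pvEventOf? kv = none := by simp [pvEventOf?, hv, hs]
          rw [he]; simpa using ih f gl hp h1 h2
        · have he : pvEventOf? kv = none := by simp [pvEventOf?, hv, hs]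
          rw [he]; simpa using ih f gl hp h1 h2
        · have he : pvEventOf? kv = none := by simp [pvEventOf?, hv, hs]
          rw [he]; simpa using ih f gl hp h1 h2
        · dsimp only []
          cases hoi : PySem.Int.ofStr? i with
          | none =>
            have he : pvEventOf? kv = none := by simp [pvEventOf?, hv, hs, hoi]
            rw [he]
            exact ih f gl hp h1 h2
          | some ti =>
            have he : pvEventOf? kv = some ((e, PySem.Int.toStr (ti + 1)),
                pvCat [(if PySem.Str.replace a "_" " " = "pp" then "pp."
                        else PySem.Str.replace a "_" " "), " ", PySem.Str.strip kv.2]) := by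
              simp [pvEventOf?, hv, hs, hoi]
            rw [he, List.foldl_cons]
            dsimp only []
            set hix := PySem.Int.toStr (ti + 1) with hh
            set attr1 := PySem.Str.replace a "_" " " with hattr1
            set attr := if attr1 = "pp" then "pp." else attr1 with hattr
            set p := pvCat [attr, " ", PySem.Str.strip kv.2] with hp2
            have hfeq : (f.modify e PySem.Dict.empty
                (fun entities => entities.modify hix [] (fun l => l ++ [p]))).items
                = pvGbump e (fun entities => entities.modify hix [] (fun l => l ++ [p]))
                    ((PySem.Dict.empty).modify hix [] (fun l => l ++ [p])) f.items :=
              pvModify_items f e PySem.Dict.empty _ h1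
            refine ih _ _ ?_ ?_ ?_
            · rw [hfeq]
              exact (pvFlat_step e hix p f.items h1 h2).trans
                (pvGbump_perm (e, hix) (fun l => l ++ [p]) [p] hp
                  (pvFlat_keys_nodup f.items h1 h2))
            · rw [hfeq, pvGbump_keys]
              split_ifs with hm
              · exact h1
              · refine List.Nodup.append h1 (List.nodup_singleton _) ?_
                intro a ha hb
                simp only [List.mem_singleton] at hb
                exact hm (hb ▸ ha)
            · rw [hfeq]
              refine pvGbump_forall _ _ _ _ _ h2 ?_ ?_
              · have he0 : ((PySem.Dict.empty : PySem.Dict String (List String)).modify hix []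
                    (fun l => l ++ [p])).items = [(hix, [] ++ [p])] :=
                  pvModify_items PySem.Dict.empty hix [] _ (by simp [PySem.Dict.empty])
                simp [he0]
              · intro w hw
                have hwitems : (w.modify hix [] (fun l => l ++ [p])).items
                    = pvGbump hix (fun l => l ++ [p]) ([] ++ [p]) w.items :=
                  pvModify_items w hix [] _ hw
                simp only [hwitems, pvGbump_keys]
                split_ifs with hm
                · exact hw
                · refine List.Nodup.append hw (List.nodup_singleton _) ?_
                  intro a ha hb
                  simp only [List.mem_singleton] at hb
                  exact hm (hb ▸ ha)
        · have he : pvEventOf? kv = none := by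
            simp only [pvEventOf?, hs, if_neg hv]
          rw [he]
          exact ih f gl hp h1 h2

-- B's distinct-key scan
def pvSeen (events : List ((String × String) × String)) : List (String × String) :=
  events.foldl (fun s e => if e.1 ∈ s then s else s ++ [e.1]) []

theorem pvSeen_aux_mem (l : List ((String × String) × String)) (s : List (String × String))
    (k : String × String) :
    k ∈ l.foldl (fun s e => if e.1 ∈ s then s else s ++ [e.1]) s ↔ k ∈ s ∨ k ∈ l.map Prod.fst := by
  induction l generalizing s with
  | nil => simp
  | cons e r ih =>
    by_cases hm : e.1 ∈ s
    · simp only [List.foldl_cons, hm, if_true, ih, List.map_cons, List.mem_cons]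
      constructor
      · rintro (h | h)
        · exact Or.inl h
        · exact Or.inr (Or.inr h)
      · rintro (h | h | h)
        · exact Or.inl h
        · exact Or.inl (h ▸ hm)
        · exact Or.inr h
    · simp only [List.foldl_cons, hm, if_false, ih, List.map_cons, List.mem_cons,
        List.mem_append]
      tauto

theorem pvSeen_aux_nodup (l : List ((String × String) × String)) (s : List (String × String))
    (h : s.Nodup) : (l.foldl (fun s e => if e.1 ∈ s then s else s ++ [e.1]) s).Nodup := by
  induction l generalizing s with
  | nil => simpa
  | cons e r ih =>
    by_cases hm : e.1 ∈ s
    · simp only [List.foldl_cons, hm, if_true]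
      exact ih s h
    · simp only [List.foldl_cons, hm, if_false]
      refine ih (s ++ [e.1]) ?_
      refine List.Nodup.append h (List.nodup_singleton _) ?_
      intro a ha hb
      simp only [List.mem_singleton] at hb
      exact hm (hb ▸ ha)

theorem pvSeen_mem (events : List ((String × String) × String)) (k : String × String) :
    k ∈ pvSeen events ↔ k ∈ events.map Prod.fst := by
  simpa using pvSeen_aux_mem events [] k

theorem pvSeen_nodup (events : List ((String × String) × String)) : (pvSeen events).Nodup :=
  pvSeen_aux_nodup events [] List.nodup_nil

-- the flat grouping that B computes by rescanning the event list
def pvCanon (events : List ((String × String) × String)) :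
    List ((String × String) × List String) :=
  (pvSeen events).map (fun k => (k, (events.filter (fun q => q.1 == k)).map Prod.snd))

theorem pvCanon_keys (events : List ((String × String) × String)) :
    (pvCanon events).map Prod.fst = pvSeen events := by
  simp [pvCanon, List.map_map, Function.comp_def]

-- folding the grouping step over the events yields exactly B's rescanned groups
theorem pvCanon_eq_foldl (events : List ((String × String) × String)) :
    events.foldl pvGStep [] = pvCanon events := by
  induction events using List.reverseRecOn with
  | nil => rfl
  | append_singleton l e ih =>
    rw [List.foldl_append, List.foldl_cons, List.foldl_nil, ih]
    have hseen : pvSeen (l ++ [e])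
        = if e.1 ∈ pvSeen l then pvSeen l else pvSeen l ++ [e.1] := by
      unfold pvSeen
      rw [List.foldl_append, List.foldl_cons, List.foldl_nil]
    have hfilter : ∀ k, (l ++ [e]).filter (fun q => q.1 == k)
        = l.filter (fun q => q.1 == k) ++ (if e.1 = k then [e] else []) := by
      intro k
      rw [List.filter_append]
      by_cases hk : e.1 = k
      · simp [hk]
      · simp [hk]
    by_cases hm : e.1 ∈ pvSeen l
    · unfold pvGStep
      rw [pvGbump_eq_map e.1 _ _ (pvCanon l)
        (by rw [pvCanon_keys]; exact pvSeen_nodup l)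
        (by rw [pvCanon_keys]; exact hm)]
      unfold pvCanon
      rw [hseen, if_pos hm, List.map_map]
      refine List.map_congr_left (fun k hk => ?_)
      by_cases hek : k = e.1
      · subst hek
        simp [hfilter e.1]
      · have hek' : e.1 ≠ k := fun h => hek h.symm
        simp [hfilter k, hek, hek']
    · unfold pvGStep
      rw [pvGbump_of_not_mem e.1 _ _ (pvCanon l) (by rw [pvCanon_keys]; exact hm)]
      unfold pvCanon
      rw [hseen, if_neg hm, List.map_append]
      congr 1
      · refine List.map_congr_left (fun k hk => ?_)
        have hek : e.1 ≠ k := fun h => hm (h ▸ hk)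
        rw [hfilter k, if_neg hek]
        simp
      · have hnil : l.filter (fun q => q.1 == e.1) = [] := by
          rw [List.filter_eq_nil_iff]
          intro q hq hq1
          have hq2 : q.1 = e.1 := by simpa using hq1
          exact hm ((pvSeen_mem l e.1).mpr (hq2 ▸ List.mem_map_of_mem hq))
        simp [hnil]

theorem pvFoldl_if_filterMap {α β : Type} (P : α → Prop) [DecidablePred P] (f : α → β)
    (l : List α) (acc : List β) :
    l.foldl (fun acc x => if P x then acc else acc ++ [f x]) acc
      = acc ++ l.filterMap (fun x => if P x then none else some (f x)) := by
  induction l generalizing acc with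
  | nil => simp
  | cons q r ih =>
    by_cases hq : P q <;> simp [hq, ih]

-- the comment string built for one ((entity, human_index), sentence_parts) group
def pvFmt (ghl : (String × String) × List String) : String :=
  pvCat [pvToMany.getD ghl.1.1 "", " reference ", ghl.1.2, ": ",
         PySem.Str.join ", " ghl.2, "."]

theorem pvDoubleLoop (L : List (String × PySem.Dict String (List String))) (acc : List String) :
    L.foldl (fun acc ekv =>
      ekv.2.items.foldl (fun acc2 il =>
        acc2 ++ [pvCat [pvToMany.getD ekv.1 "", " reference ", il.1, ": ",
          PySem.Str.join ", " il.2, "."]]) acc) acc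
      = acc ++ (pvFlat L).map pvFmt := by
  induction L generalizing acc with
  | nil => simp [pvFlat]
  | cons q r ih =>
    rw [List.foldl_cons, PySem.List.foldl_append_singleton_eq_map, ih]
    simp [pvFlat, pvFmt, List.map_map, List.append_assoc]

-- ===== VERDICT (by name: the statement is the Claim_ definition above) =====
set_option maxHeartbeats 2000000 in
theorem get_comments_ppp_spec : Claim_equal_get_comments_ppp := by
  intro pp _hdom _hpre
  unfold Spec_get_comments_ppp get_comments_ppp get_comments_ppp_alt
  dsimp only []
  rw [pvFoldl_if_filterMap
    (fun an => PySem.Str.strip ((PySem.Dict.ofList pp).getD an.1 "") = "")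
    (fun an => pvCat [an.2, ": ", PySem.Str.strip ((PySem.Dict.ofList pp).getD an.1 ""), "."])
    pvCommentsAttrs []]
  rw [pvDoubleLoop]
  rw [pvEvents_eq ((PySem.Dict.ofList pp).items) []]
  simp only [List.nil_append]
  congr 1
  refine congrArg₂ (· ++ ·) rfl ?_
  -- the tails agree: A's flattened nested dict is a permutation of B's rescanned groups
  have hperm := pvMain_inv ((PySem.Dict.ofList pp).items) PySem.Dict.empty []
    (by simp [pvFlat, PySem.Dict.empty]) (by simp [PySem.Dict.empty]) (by simp [PySem.Dict.empty])
  rw [pvCanon_eq_foldl] at hperm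
  have hB : ((pvSeen ((PySem.Dict.ofList pp).items.filterMap pvEventOf?)).map (fun k =>
      pvCat [pvToMany.getD k.1 "", " reference ", k.2, ": ",
        PySem.Str.join ", "
          ((((PySem.Dict.ofList pp).items.filterMap pvEventOf?).filter
            (fun q => q.1 == k)).map Prod.snd), "."]))
      = (pvCanon ((PySem.Dict.ofList pp).items.filterMap pvEventOf?)).map pvFmt := by
    simp only [pvCanon, List.map_map]
    rfl
  rw [show (((PySem.Dict.ofList pp).items.filterMap pvEventOf?).foldl
      (fun s e => if e.1 ∈ s then s else s ++ [e.1]) [])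
      = pvSeen ((PySem.Dict.ofList pp).items.filterMap pvEventOf?) from rfl]
  rw [hB]
  exact PySem.List.sorted_eq_sorted_of_perm _ _ (fun x => x) (fun a b h => h)
    (hperm.map pvFmt)
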